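-- pv_equiv track=rewrite | github.com/choijaehoon1/programmers_python | graph/test03.py | solution
-- ===== SOURCE A (Python) =====
-- from collections import deque
--
-- dx = [-1,-1,0,1,1,1,0,-1]
--
-- dy = [0,1,1,1,0,-1,-1,-1]
--
-- def solution(arrows):
--     answer = 0
--     q = deque()
--     v = {} # 정점
--     dir = {} # 경로
--
--     # 초기 설정
--     x,y = 0,0
--     q.append((x,y))
--     v[(x,y)] = 0
--
--     # arrows에서 정점, 방향 정보를 저장
--     for i in arrows:
--         for j in range(2): # 교차될수도 있으니 거리를 2배로 잡고 수행
--             nx = x + dx[i]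
--             ny = y + dy[i]
--             q.append((nx,ny))
--             v[(nx,ny)] = 0
--             # 반대로 돌아가는 경로 고려
--             dir[(x,y,nx,ny)] = 0
--             dir[(nx,ny,x,y)] = 0
--             x,y = nx,ny
--
--     x,y = q.popleft()
--     v[(x,y)] = 1
--
--     while q:
--         nx, ny = q.popleft()
--         if v[(nx,ny)] == 1 and dir[(x,y,nx,ny)] == 0: # 정점을 들린적이 있는데 경로는 새로운 경로일 때 사이클 생성됨
--             answer += 1
--             dir[(x,y,nx,ny)] = 1
--             dir[(nx,ny,x,y)] = 1
--         else: # 해당 위치 방문 처리 및 경로 방문 처리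
--             v[(nx,ny)] = 1
--             dir[(x,y,nx,ny)] = 1
--             dir[(nx,ny,x,y)] = 1
--         x,y = nx,ny
--
--     return answer
-- ===== SOURCE B (Python) =====
-- dx = [-1,-1,0,1,1,1,0,-1]
-- dy = [0,1,1,1,0,-1,-1,-1]
--
-- def solution(arrows):
--     answer = 0
--     x, y = 0, 0
--     visited = {(0, 0)}
--     edges = set()
--     for i in arrows:
--         for _ in range(2):  # half-steps so crossing diagonals meet at a vertex
--             nx, ny = x + dx[i], y + dy[i]
--             if (nx, ny) in visited and (x, y, nx, ny) not in edges:
--                 answer += 1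
--             else:
--                 visited.add((nx, ny))
--             edges.add((x, y, nx, ny))
--             edges.add((nx, ny, x, y))
--             x, y = nx, ny
--     return answer
-- ===== Notes on version B (the rewrite author's own statement) =====
-- stated objective: simpler
-- what changed: Replaces A's deque plus a pre-population pass (dicts of all vertices and edges initialised to 0, then replayed in a second while-loop) by a single pass over the arrows that tracks the current position, a visited-vertex set and a visited-edge set.
import Mathlib
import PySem

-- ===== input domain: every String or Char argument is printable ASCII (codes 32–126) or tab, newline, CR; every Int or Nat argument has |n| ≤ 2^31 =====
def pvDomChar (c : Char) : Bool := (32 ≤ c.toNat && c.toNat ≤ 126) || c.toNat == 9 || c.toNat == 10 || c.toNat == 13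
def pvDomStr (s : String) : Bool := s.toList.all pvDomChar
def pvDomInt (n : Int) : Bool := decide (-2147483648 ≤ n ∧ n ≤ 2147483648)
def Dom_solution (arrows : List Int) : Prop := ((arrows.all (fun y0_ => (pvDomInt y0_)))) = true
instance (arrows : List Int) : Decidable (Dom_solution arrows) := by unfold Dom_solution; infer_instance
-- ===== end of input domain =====

-- B replaces A's deque + pre-population dicts + replay loop by a single pass over the arrows
-- with a visited-vertex set and a visited-edge set (objective: simpler).

-- ===== PORT A =====
def pvDx : List Int := [-1, -1, 0, 1, 1, 1, 0, -1]
def pvDy : List Int := [0, 1, 1, 1, 0, -1, -1, -1]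
-- dx[i] / dy[i]: Python list indexing (negative wraps); out-of-range raises IndexError,
-- excluded by Pre_solution — the .getD 0 default is never reached there.
def pvDxv (i : Int) : Int := (PySem.List.pyGet? pvDx i).getD 0
def pvDyv (i : Int) : Int := (PySem.List.pyGet? pvDy i).getD 0

-- one iteration of A's inner 'for j in range(2)' body
def pvAStep1 (st : List (Int × Int) × PySem.Dict (Int × Int) Int ×
    PySem.Dict (Int × Int × Int × Int) Int × Int × Int) (i : Int) :
    List (Int × Int) × PySem.Dict (Int × Int) Int ×
    PySem.Dict (Int × Int × Int × Int) Int × Int × Int :=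
  let (q, v, dir, x, y) := st
  let nx := x + pvDxv i
  let ny := y + pvDyv i
  (q ++ [(nx, ny)], v.insert (nx, ny) 0,
   (dir.insert (x, y, nx, ny) 0).insert (nx, ny, x, y) 0, nx, ny)

-- A's first double loop over arrows
def pvAFold (arrows : List Int)
    (st : List (Int × Int) × PySem.Dict (Int × Int) Int ×
      PySem.Dict (Int × Int × Int × Int) Int × Int × Int) :
    List (Int × Int) × PySem.Dict (Int × Int) Int ×
    PySem.Dict (Int × Int × Int × Int) Int × Int × Int :=
  arrows.foldl (fun st i => (PySem.List.pyRange 0 2 1).foldl (fun st _ => pvAStep1 st i) st) st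

-- A's 'while q' replay loop
def pvAPhase2 (ans x y : Int) (v : PySem.Dict (Int × Int) Int)
    (dir : PySem.Dict (Int × Int × Int × Int) Int) : List (Int × Int) → Int
  | [] => ans
  | (nx, ny) :: rest =>
    if v.getD (nx, ny) 0 == 1 && dir.getD (x, y, nx, ny) 0 == 0 then
      pvAPhase2 (ans + 1) nx ny v ((dir.insert (x, y, nx, ny) 1).insert (nx, ny, x, y) 1) rest
    else
      pvAPhase2 ans nx ny (v.insert (nx, ny) 1)
        ((dir.insert (x, y, nx, ny) 1).insert (nx, ny, x, y) 1) rest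

def solution (arrows : List Int) : Int :=
  let s := pvAFold arrows
    ([((0 : Int), (0 : Int))],
     (PySem.Dict.empty : PySem.Dict (Int × Int) Int).insert (0, 0) 0,
     (PySem.Dict.empty : PySem.Dict (Int × Int × Int × Int) Int), (0 : Int), (0 : Int))
  -- q.popleft(): q is never empty (it was seeded with (0,0)), so headD's default is unreachable
  let p := s.1.headD (0, 0)
  pvAPhase2 0 p.1 p.2 (s.2.1.insert p 1) s.2.2.1 s.1.tail

-- ===== PORT B =====
-- one half-step of B: check visited vertex + new edge, then mark edge both ways and advance
def pvBStep (st : Int × Int × Int × PySem.Set (Int × Int) × PySem.Set (Int × Int × Int × Int))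
    (i : Int) : Int × Int × Int × PySem.Set (Int × Int) × PySem.Set (Int × Int × Int × Int) :=
  let (ans, x, y, vis, ed) := st
  let nx := x + pvDxv i
  let ny := y + pvDyv i
  if vis.contains (nx, ny) && !ed.contains (x, y, nx, ny) then
    (ans + 1, nx, ny, vis, (ed.add (x, y, nx, ny)).add (nx, ny, x, y))
  else
    (ans, nx, ny, PySem.Set.add vis (nx, ny), (ed.add (x, y, nx, ny)).add (nx, ny, x, y))

def solution_alt (arrows : List Int) : Int :=
  (arrows.foldl (fun st i => (PySem.List.pyRange 0 2 1).foldl (fun st _ => pvBStep st i) st)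
    (0, 0, 0, PySem.Set.add PySem.Set.empty ((0 : Int), (0 : Int)),
     (PySem.Set.empty : PySem.Set (Int × Int × Int × Int)))).1

-- ===== PRECONDITION & SPEC =====
-- Pre_ excludes exactly the inputs where Python's dx[i]/dy[i] raises IndexError (both A and B raise there).
def Pre_solution (arrows : List Int) : Prop := ∀ i ∈ arrows, -8 ≤ i ∧ i < 8
instance (arrows : List Int) : Decidable (Pre_solution arrows) := by unfold Pre_solution; infer_instance
def pvWitness_solution : List Int := [6, 6, 0, 2, 4, 2, 0]

def Spec_solution (arrows : List Int) (out : Int) : Prop := out = solution_alt arrows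
instance (arrows : List Int) (out : Int) : Decidable (Spec_solution arrows out) := by unfold Spec_solution; infer_instance

-- ===== CLAIM (what is proved, stated in full; the proofs are below) =====
def Claim_equal_solution : Prop := ∀ (arrows : List Int), Dom_solution arrows → Pre_solution arrows → Spec_solution arrows (solution arrows)

-- ===== LEMMAS AND PROOFS =====

-- the sequence of grid points the walk visits (two half-steps per arrow), starting after (x,y)
def pvSteps (arrows : List Int) (x y : Int) : List (Int × Int) :=
  match arrows with
  | [] => []
  | i :: rest =>
    let nx := x + pvDxv i
    let ny := y + pvDyv i
    let mx := nx + pvDxv i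
    let my := ny + pvDyv i
    (nx, ny) :: (mx, my) :: pvSteps rest mx my

-- B's step, pointwise on the target vertex
def pvBPt (st : Int × Int × Int × PySem.Set (Int × Int) × PySem.Set (Int × Int × Int × Int))
    (p : Int × Int) : Int × Int × Int × PySem.Set (Int × Int) × PySem.Set (Int × Int × Int × Int) :=
  let (ans, x, y, vis, ed) := st
  if vis.contains p && !ed.contains (x, y, p.1, p.2) then
    (ans + 1, p.1, p.2, vis, (ed.add (x, y, p.1, p.2)).add (p.1, p.2, x, y))
  else
    (ans, p.1, p.2, PySem.Set.add vis p, (ed.add (x, y, p.1, p.2)).add (p.1, p.2, x, y))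

theorem pvRange2 : PySem.List.pyRange 0 2 1 = [0, 1] := by decide

theorem pvBStep_eq_pt (st : Int × Int × Int × PySem.Set (Int × Int) × PySem.Set (Int × Int × Int × Int)) (i : Int) :
    pvBStep st i = pvBPt st (st.2.1 + pvDxv i, st.2.2.1 + pvDyv i) := by
  obtain ⟨a, x, y, vi, e⟩ := st; rfl

theorem pvBPt_x (st : Int × Int × Int × PySem.Set (Int × Int) × PySem.Set (Int × Int × Int × Int)) (p : Int × Int) :
    (pvBPt st p).2.1 = p.1 := by
  obtain ⟨a, x, y, vi, e⟩ := st
  show (if _ = true then _ else _ : Int × Int × Int × _ × _).2.1 = p.1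
  split <;> rfl

theorem pvBPt_y (st : Int × Int × Int × PySem.Set (Int × Int) × PySem.Set (Int × Int × Int × Int)) (p : Int × Int) :
    (pvBPt st p).2.2.1 = p.2 := by
  obtain ⟨a, x, y, vi, e⟩ := st
  show (if _ = true then _ else _ : Int × Int × Int × _ × _).2.2.1 = p.2
  split <;> rfl

theorem pvB_eq_fold (arrows : List Int) :
    ∀ (st : Int × Int × Int × PySem.Set (Int × Int) × PySem.Set (Int × Int × Int × Int)),
    arrows.foldl (fun st i => (PySem.List.pyRange 0 2 1).foldl (fun st _ => pvBStep st i) st) st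
    = (pvSteps arrows st.2.1 st.2.2.1).foldl pvBPt st := by
  induction arrows with
  | nil => intro st; rfl
  | cons i rest ih =>
    intro st
    rw [List.foldl_cons]
    have hin : (PySem.List.pyRange 0 2 1).foldl (fun st _ => pvBStep st i) st
        = pvBStep (pvBStep st i) i := by rw [pvRange2]; rfl
    rw [hin, pvBStep_eq_pt st i, pvBStep_eq_pt, ih]
    simp only [pvSteps, List.foldl_cons, pvBPt_x, pvBPt_y]

theorem pvA_fold_q (arrows : List Int) (q : List (Int × Int))
    (v : PySem.Dict (Int × Int) Int) (dir : PySem.Dict (Int × Int × Int × Int) Int) (x y : Int) :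
    (pvAFold arrows (q, v, dir, x, y)).1 = q ++ pvSteps arrows x y := by
  induction arrows generalizing q v dir x y with
  | nil => simp [pvAFold, pvSteps]
  | cons i rest ih =>
    simp only [pvAFold, List.foldl_cons, pvRange2, List.foldl, pvAStep1, pvSteps] at *
    rw [ih]; simp

theorem pvA_fold_v (arrows : List Int) (q : List (Int × Int))
    (v : PySem.Dict (Int × Int) Int) (dir : PySem.Dict (Int × Int × Int × Int) Int) (x y : Int)
    (hv : ∀ p, v.getD p 0 = 0) :
    ∀ p, (pvAFold arrows (q, v, dir, x, y)).2.1.getD p 0 = 0 := by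
  induction arrows generalizing q v dir x y with
  | nil => exact hv
  | cons i rest ih =>
    simp only [pvAFold, List.foldl_cons, pvRange2, List.foldl, pvAStep1] at *
    apply ih
    intro p
    simp [PySem.Dict.getD_insert, hv]

theorem pvA_fold_dir (arrows : List Int) (q : List (Int × Int))
    (v : PySem.Dict (Int × Int) Int) (dir : PySem.Dict (Int × Int × Int × Int) Int) (x y : Int)
    (hd : ∀ e, dir.getD e 0 = 0) :
    ∀ e, (pvAFold arrows (q, v, dir, x, y)).2.2.1.getD e 0 = 0 := by
  induction arrows generalizing q v dir x y with
  | nil => exact hd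
  | cons i rest ih =>
    simp only [pvAFold, List.foldl_cons, pvRange2, List.foldl, pvAStep1] at *
    apply ih
    intro e
    simp [PySem.Dict.getD_insert, hd]

-- the replay loop of A equals B's pointwise fold under the v↔visited, dir↔edges correspondence
theorem pvPhase2_eq (L : List (Int × Int)) : ∀ (ans x y : Int)
    (v : PySem.Dict (Int × Int) Int) (dir : PySem.Dict (Int × Int × Int × Int) Int)
    (vis : PySem.Set (Int × Int)) (ed : PySem.Set (Int × Int × Int × Int)),
    (∀ p, (v.getD p 0 == 1) = vis.contains p) →
    (∀ e, (dir.getD e 0 == 0) = !ed.contains e) →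
    pvAPhase2 ans x y v dir L = (L.foldl pvBPt (ans, x, y, vis, ed)).1 := by
  induction L with
  | nil => intros; rfl
  | cons p rest ih =>
    intro ans x y v dir vis ed hv hd
    obtain ⟨nx, ny⟩ := p
    have hbp : pvBPt (ans, x, y, vis, ed) (nx, ny)
        = if vis.contains (nx, ny) && !ed.contains (x, y, nx, ny) then
            (ans + 1, nx, ny, vis, (ed.add (x, y, nx, ny)).add (nx, ny, x, y))
          else
            (ans, nx, ny, PySem.Set.add vis (nx, ny), (ed.add (x, y, nx, ny)).add (nx, ny, x, y)) := rfl
    have hd' : ∀ e, (((dir.insert (x, y, nx, ny) 1).insert (nx, ny, x, y) 1).getD e 0 == 0)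
        = !((ed.add (x, y, nx, ny)).add (nx, ny, x, y)).contains e := by
      intro e
      by_cases h2 : e = (nx, ny, x, y)
      · simp [h2]
      · by_cases h1 : e = (x, y, nx, ny)
        · simp [PySem.Dict.getD_insert, h1]
        · simp [PySem.Dict.getD_insert, h1, h2, hd]
    simp only [pvAPhase2, List.foldl_cons, hbp, ← hv, ← hd]
    split_ifs with hc
    · exact ih _ _ _ _ _ _ _ hv hd'
    · apply ih _ _ _ _ _ _ _ _ hd'
      intro p
      by_cases hp : p = (nx, ny)
      · simp [hp]
      · simp [PySem.Dict.getD_insert, hp, hv]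

-- ===== VERDICT (by name: the statement is the Claim_ definition above) =====
theorem solution_spec : Claim_equal_solution := by
  intro arrows _ _
  unfold Spec_solution solution solution_alt
  rw [pvB_eq_fold]
  have hq := pvA_fold_q arrows [((0 : Int), (0 : Int))]
    ((PySem.Dict.empty : PySem.Dict (Int × Int) Int).insert (0, 0) 0)
    (PySem.Dict.empty : PySem.Dict (Int × Int × Int × Int) Int) 0 0
  have hv := pvA_fold_v arrows [((0 : Int), (0 : Int))]
    ((PySem.Dict.empty : PySem.Dict (Int × Int) Int).insert (0, 0) 0)
    (PySem.Dict.empty : PySem.Dict (Int × Int × Int × Int) Int) 0 0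
    (by intro p; simp [PySem.Dict.getD_insert])
  have hd := pvA_fold_dir arrows [((0 : Int), (0 : Int))]
    ((PySem.Dict.empty : PySem.Dict (Int × Int) Int).insert (0, 0) 0)
    (PySem.Dict.empty : PySem.Dict (Int × Int × Int × Int) Int) 0 0
    (by intro e; simp)
  simp only [hq, List.cons_append, List.nil_append, List.headD_cons, List.tail_cons]
  apply pvPhase2_eq
  · intro p
    by_cases hp : p = ((0 : Int), (0 : Int))
    · simp [hp, PySem.Set.contains]
    · simp [PySem.Dict.getD_insert, hp, PySem.Set.contains, hv]
  · intro e
    simp [hd, PySem.Set.contains]
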